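-- pv_equiv track=rewrite | github.com/n28div/vlsi | utils/determine_hbound.py | greedy_height
-- ===== SOURCE A (Python) =====
-- from typing import List, Union
--
-- def greedy_height(N: int,  # number of circuits
--                   W: int,  # width of the board
--                   widths: List[int],  # ordered by width
--                   heights: List[int],  # ordered by height
--                   row_height: int = 0,
--                   height_acc: int = 0,
--                   width_acc: int = 0,
--                   it: int = 1):
--   if (it == N):
--     return height_acc  # base case, return accumulated height
--   else:
--     ew = widths[it]
--     eh = heights[it]
--     if (width_acc + ew <= W):
--       if (row_height == 0):
--         return greedy_height(N, W, widths, heights, eh, height_acc + eh, width_acc + ew, it + 1)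
--       else:
--         return greedy_height(N, W, widths, heights, row_height, height_acc, width_acc + ew, it + 1)
--     else:
--       return greedy_height(N, W, widths, heights, 0, height_acc, 0, it)
-- ===== SOURCE B (Python) =====
-- def greedy_height(N, W, widths, heights, row_height=0, height_acc=0, width_acc=0, it=1):
--     while it != N:
--         ew = widths[it]
--         eh = heights[it]
--         if width_acc + ew > W:
--             # row overflow: start a new row and retry this element
--             row_height = 0
--             width_acc = 0
--             continue
--         if row_height == 0:
--             height_acc += eh
--             row_height = eh
--         width_acc += ew
--         it += 1
--     return height_acc
-- ===== Notes on version B (the rewrite author's own statement) =====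
-- stated objective: simpler
-- what changed: Rewrites the tail recursion as an iterative while-loop over four mutable locals with a guard-style overflow reset (continue), eliminating recursion and Python's recursion-depth limit.
-- outside the precondition, e.g. on greedy_height(4, 5, [0, 9, 2, 4], [0, 1, 1, 1], 0, 0, -6, 1): A returns 2, B returns 2
import Mathlib
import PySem

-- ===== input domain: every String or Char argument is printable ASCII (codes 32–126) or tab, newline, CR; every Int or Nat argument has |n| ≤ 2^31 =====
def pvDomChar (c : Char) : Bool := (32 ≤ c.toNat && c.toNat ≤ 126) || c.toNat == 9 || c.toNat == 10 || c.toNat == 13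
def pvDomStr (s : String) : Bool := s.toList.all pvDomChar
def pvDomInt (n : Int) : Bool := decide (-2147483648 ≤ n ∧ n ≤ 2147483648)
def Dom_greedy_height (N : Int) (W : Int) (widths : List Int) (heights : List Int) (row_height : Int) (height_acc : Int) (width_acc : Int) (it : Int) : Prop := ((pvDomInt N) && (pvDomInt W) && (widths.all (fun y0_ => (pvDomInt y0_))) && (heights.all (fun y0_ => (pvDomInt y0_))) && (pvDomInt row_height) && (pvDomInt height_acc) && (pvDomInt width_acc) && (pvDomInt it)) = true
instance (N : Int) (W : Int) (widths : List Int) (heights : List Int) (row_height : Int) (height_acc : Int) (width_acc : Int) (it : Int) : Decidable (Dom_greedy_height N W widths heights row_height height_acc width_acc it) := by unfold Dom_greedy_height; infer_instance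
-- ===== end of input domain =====

-- B rewrites A's tail recursion as an iterative while-loop over four mutable locals with a
-- guard-style overflow reset (continue); equivalence of return values is proved on Pre_.

-- ===== PORT A =====
-- Literal transliteration of A's tail recursion, with a fuel parameter only to make the Lean
-- function total (A diverges / raises RecursionError when an overflowing element is itself wider
-- than W; Pre_ excludes that).  widths[it] / heights[it] are ported as pyGetD (exact under Pre_,
-- which demands the indices be in range; Python raises IndexError outside).
-- ew / eh of the Python are the two pyGetD reads, written inline.
def greedyGo : Nat → Int → Int → List Int → List Int → Int → Int → Int → Int → Int
  | 0, _, _, _, _, _, height_acc, _, _ => height_acc  -- fuel exhausted; unreachable under Pre_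
  | fuel+1, N, W, widths, heights, row_height, height_acc, width_acc, it =>
    if it = N then height_acc
    else
      if width_acc + PySem.List.pyGetD widths it 0 ≤ W then
        if row_height = 0 then
          greedyGo fuel N W widths heights (PySem.List.pyGetD heights it 0)
            (height_acc + PySem.List.pyGetD heights it 0)
            (width_acc + PySem.List.pyGetD widths it 0) (it + 1)
        else
          greedyGo fuel N W widths heights row_height height_acc
            (width_acc + PySem.List.pyGetD widths it 0) (it + 1)
      else
        greedyGo fuel N W widths heights 0 height_acc 0 it

def greedy_height (N : Int) (W : Int) (widths : List Int) (heights : List Int) (row_height : Int) (height_acc : Int) (width_acc : Int) (it : Int) : Int :=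
  greedyGo (2 * (N - it).toNat + 1) N W widths heights row_height height_acc width_acc it

-- ===== PORT B =====
-- Source B's while-loop, as a fuel loop over the mutable state (row_height, height_acc, width_acc, it);
-- fuel only makes it total (the loop hangs exactly where A recurses forever; Pre_ excludes that).
def altLoop : Nat → Int → Int → List Int → List Int → Int × Int × Int × Int → Int
  | 0, _, _, _, _, st => st.2.1  -- fuel exhausted; unreachable under Pre_
  | fuel+1, N, W, widths, heights, st =>
    if st.2.2.2 = N then st.2.1
    else
      altLoop fuel N W widths heights
        (if W < st.2.2.1 + PySem.List.pyGetD widths st.2.2.2 0 then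
            (0, st.2.1, 0, st.2.2.2)  -- overflow: new row, retry this element
          else if st.1 = 0 then
            (PySem.List.pyGetD heights st.2.2.2 0,
             st.2.1 + PySem.List.pyGetD heights st.2.2.2 0,
             st.2.2.1 + PySem.List.pyGetD widths st.2.2.2 0, st.2.2.2 + 1)
          else
            (st.1, st.2.1, st.2.2.1 + PySem.List.pyGetD widths st.2.2.2 0, st.2.2.2 + 1))

def greedy_height_alt (N : Int) (W : Int) (widths : List Int) (heights : List Int) (row_height : Int) (height_acc : Int) (width_acc : Int) (it : Int) : Int :=
  altLoop (2 * (N - it).toNat + 1) N W widths heights (row_height, height_acc, width_acc, it)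

-- Sum of the widths at indices a..b-1 (Python indexing), used by Pre_'s no-overflow disjunct.
def rowSum (widths : List Int) (a b : Int) : Int :=
  (((PySem.List.pyRange a b 1).map (fun k => PySem.List.pyGetD widths k 0)).sum)

-- ===== PRECONDITION & SPEC =====
-- Pre_: it ≤ N, every index in [it, N) is in range for both lists (Python raises IndexError
-- otherwise) and every width there is ≤ W (otherwise A can recurse forever on the overflow
-- branch: RecursionError).  Termination is guaranteed in closed form by either disjunct: every
-- width in the range is ≤ W (every retry after a reset then succeeds), or no overflow ever occurs
-- (every running prefix sum stays ≤ W, so A never resets).  This is slightly narrower than A's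
-- exact termination condition (a width > W is harmless at an index where no overflow happens);
-- on such excluded inputs A still returns and B returns the same value.
def Pre_greedy_height (N : Int) (W : Int) (widths : List Int) (heights : List Int) (row_height : Int) (height_acc : Int) (width_acc : Int) (it : Int) : Prop :=
  it ≤ N ∧
  (it < N → N ≤ (widths.length : Int) ∧ N ≤ (heights.length : Int) ∧
            -(widths.length : Int) ≤ it ∧ -(heights.length : Int) ≤ it) ∧
  ((∀ j ∈ PySem.List.pyRange it N 1, PySem.List.pyGetD widths j 0 ≤ W) ∨
   (∀ j ∈ PySem.List.pyRange it N 1, width_acc + rowSum widths it (j + 1) ≤ W))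
instance (N : Int) (W : Int) (widths : List Int) (heights : List Int) (row_height : Int) (height_acc : Int) (width_acc : Int) (it : Int) : Decidable (Pre_greedy_height N W widths heights row_height height_acc width_acc it) := by unfold Pre_greedy_height; infer_instance

def pvWitness_greedy_height : Int × Int × List Int × List Int × Int × Int × Int × Int :=
  (4, 10, [3, 4, 5, 9], [2, 3, 4, 5], 0, 0, 0, 1)

def Spec_greedy_height (N : Int) (W : Int) (widths : List Int) (heights : List Int) (row_height : Int) (height_acc : Int) (width_acc : Int) (it : Int) (out : Int) : Prop := out = greedy_height_alt N W widths heights row_height height_acc width_acc it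
instance (N : Int) (W : Int) (widths : List Int) (heights : List Int) (row_height : Int) (height_acc : Int) (width_acc : Int) (it : Int) (out : Int) : Decidable (Spec_greedy_height N W widths heights row_height height_acc width_acc it out) := by unfold Spec_greedy_height; infer_instance

-- ===== CLAIM (what is proved, stated in full; the proofs are below) =====
def Claim_equal_greedy_height : Prop := ∀ (N : Int) (W : Int) (widths : List Int) (heights : List Int) (row_height : Int) (height_acc : Int) (width_acc : Int) (it : Int), Dom_greedy_height N W widths heights row_height height_acc width_acc it → Pre_greedy_height N W widths heights row_height height_acc width_acc it → Spec_greedy_height N W widths heights row_height height_acc width_acc it (greedy_height N W widths heights row_height height_acc width_acc it)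

-- ===== LEMMAS AND PROOFS =====

-- A's recursion and B's loop consume fuel in lockstep through identical states,
-- so with equal fuel they agree on every input.
lemma greedyGo_eq_altLoop (N W : Int) (widths heights : List Int) :
    ∀ (fuel : Nat) (rh ha wa it : Int),
      greedyGo fuel N W widths heights rh ha wa it
        = altLoop fuel N W widths heights (rh, ha, wa, it) := by
  intro fuel
  induction fuel with
  | zero => intro rh ha wa it; rfl
  | succ f ih =>
    intro rh ha wa it
    rw [greedyGo, altLoop]
    by_cases hN : it = N
    · rw [if_pos hN, if_pos hN]
    · rw [if_neg hN, if_neg hN]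
      by_cases hov : wa + PySem.List.pyGetD widths it 0 ≤ W
      · rw [if_pos hov, if_neg (show ¬ W < wa + PySem.List.pyGetD widths it 0 by omega)]
        by_cases hrh : rh = 0
        · rw [if_pos hrh, if_pos hrh, hrh, ih]
        · rw [if_neg hrh, if_neg hrh, ih]
      · rw [if_neg hov, if_pos (show W < wa + PySem.List.pyGetD widths it 0 by omega), ih]

-- ===== VERDICT (by name: the statement is the Claim_ definition above) =====
theorem greedy_height_spec : Claim_equal_greedy_height := by
  intro N W widths heights rh ha wa it _ _
  unfold Spec_greedy_height greedy_height greedy_height_alt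
  exact greedyGo_eq_altLoop N W widths heights _ rh ha wa it
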